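-- pv_equiv track=rewrite | github.com/CaoYan1/JDCrawler | mainFile/tool.py | header2Dic
-- ===== SOURCE A (Python) =====
-- def header2Dic(str):
--     result = ['\'']
--     for c in str:
--         if c == ':':
--             result.append('\'')
--             result.append(c)
--             result.append('\'')
--         elif c == '\n':
--             result.append('\'')
--             result.append(',')
--             result.append(c)
--             result.append('\'')
--         elif c == '\r' or c == ' ':
--             continue
--         else:
--             result.append(c)
--     return ''.join(result)
-- ===== SOURCE B (Python) =====
-- def header2Dic(str):
--     return "'" + (str.replace('\r', '')
--                      .replace(' ', '')
--                      .replace(':', "':'")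
--                      .replace('\n', "',\n'"))
-- ===== Notes on version B (the rewrite author's own statement) =====
-- stated objective: idiomatic
-- what changed: Replaced the explicit per-character loop with list accumulator by a chain of whole-string str.replace passes (delete CR and spaces, then quote around ':' and around the ',\n' separator), prepending the single opening quote.
import Mathlib
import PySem

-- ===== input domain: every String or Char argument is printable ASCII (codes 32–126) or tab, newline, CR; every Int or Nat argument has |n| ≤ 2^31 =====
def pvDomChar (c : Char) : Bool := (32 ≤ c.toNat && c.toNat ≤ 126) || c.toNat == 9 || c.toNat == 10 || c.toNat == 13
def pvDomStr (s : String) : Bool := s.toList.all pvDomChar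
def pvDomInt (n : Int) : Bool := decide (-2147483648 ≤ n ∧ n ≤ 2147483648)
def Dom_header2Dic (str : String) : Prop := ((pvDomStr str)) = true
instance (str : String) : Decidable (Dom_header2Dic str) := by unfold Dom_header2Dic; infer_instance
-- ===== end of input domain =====

-- B replaces A's per-character loop by a chain of whole-string replace passes (idiomatic; same cost).

-- ===== PORT A =====
-- A builds a list of string pieces and joins it; ported as a fold over the
-- characters accumulating the joined character list.
def header2Dic (str : String) : String :=
  String.ofList (str.toList.foldl (fun acc c =>
    if c = ':' then acc ++ ['\'', c, '\'']
    else if c = '\n' then acc ++ ['\'', ',', c, '\'']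
    else if c = '\r' ∨ c = ' ' then acc
    else acc ++ [c]) ['\''])

-- ===== PORT B =====
def header2Dic_alt (str : String) : String :=
  "'" ++ (PySem.Str.replace (PySem.Str.replace (PySem.Str.replace
            (PySem.Str.replace str "\r" "") " " "") ":" "':'") "\n" "',\n'")

-- ===== PRECONDITION & SPEC =====
def Spec_header2Dic (str : String) (out : String) : Prop := out = header2Dic_alt str
instance (str : String) (out : String) : Decidable (Spec_header2Dic str out) := by unfold Spec_header2Dic; infer_instance

-- ===== CLAIM (what is proved, stated in full; the proofs are below) =====
def Claim_equal_header2Dic : Prop := ∀ (str : String), Dom_header2Dic str → Spec_header2Dic str (header2Dic str)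

-- ===== LEMMAS AND PROOFS =====

-- per-character output of A's loop
def pvF (c : Char) : List Char :=
  if c = ':' then ['\'', c, '\'']
  else if c = '\n' then ['\'', ',', c, '\'']
  else if c = '\r' ∨ c = ' ' then []
  else [c]

theorem pv_replace_go_single (x : Char) (ns : List Char) :
    ∀ (l : List Char) (fuel : Nat) (acc : List Char), l.length ≤ fuel →
      PySem.Chars.replace.go [x] ns fuel l acc =
        acc.reverse ++ l.flatMap (fun c => if c = x then ns else [c]) := by
  intro l
  induction l with
  | nil =>
      intro fuel acc _
      cases fuel <;> simp [PySem.Chars.replace.go]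
  | cons c t ih =>
      intro fuel acc hle
      cases fuel with
      | zero => simp at hle
      | succ n =>
        rw [PySem.Chars.replace.go]
        by_cases h : c = x
        · subst h
          have hpre : [c].isPrefixOf (c :: t) = true := by
            simp [List.isPrefixOf]
          simp only [hpre, if_pos]
          have hd : List.drop [c].length (c :: t) = t := by simp
          rw [hd, ih n (ns.reverse ++ acc) (by simpa using Nat.le_of_succ_le_succ hle)]
          simp
        · have hpre : [x].isPrefixOf (c :: t) = false := by
            simp [List.isPrefixOf]
            exact fun hx => h hx.symm
          rw [if_neg (by simp [hpre])]
          rw [ih n (c :: acc) (by simpa using Nat.le_of_succ_le_succ hle)]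
          simp [h]

theorem pv_replace_single (x : Char) (ns : List Char) (s : List Char) :
    PySem.Chars.replace s [x] ns = s.flatMap (fun c => if c = x then ns else [c]) := by
  rw [PySem.Chars.replace]
  simp only [List.isEmpty]
  · exact (by simpa using pv_replace_go_single x ns s s.length [] le_rfl)

-- A's fold equals the flatMap of pvF
theorem pv_A_flatMap (s : List Char) (acc : List Char) :
    s.foldl (fun acc c =>
      if c = ':' then acc ++ ['\'', c, '\'']
      else if c = '\n' then acc ++ ['\'', ',', c, '\'']
      else if c = '\r' ∨ c = ' ' then acc
      else acc ++ [c]) acc = acc ++ s.flatMap pvF := by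
  have : (fun (acc : List Char) (c : Char) =>
      if c = ':' then acc ++ ['\'', c, '\'']
      else if c = '\n' then acc ++ ['\'', ',', c, '\'']
      else if c = '\r' ∨ c = ' ' then acc
      else acc ++ [c]) = fun acc c => acc ++ pvF c := by
    funext a c
    by_cases h1 : c = ':' <;> by_cases h2 : c = '\n' <;>
      by_cases h3 : c = '\r' ∨ c = ' ' <;> simp [pvF, h1, h2, h3]
  rw [this, PySem.List.foldl_append_eq_flatMap]

-- the composed per-character effect of B's four passes equals pvF
theorem pv_compose (c : Char) :
    List.flatMap
        (fun x =>
          List.flatMap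
            (fun x =>
              List.flatMap (fun c => if c = '\n' then ['\'', ',', '\n', '\''] else [c])
                (if x = ':' then ['\'', ':', '\''] else [x]))
            (if x = ' ' then ([] : List Char) else [x]))
        (if c = '\r' then ([] : List Char) else [c]) = pvF c := by
  by_cases h1 : c = '\r'
  · subst h1; decide
  by_cases h2 : c = ' '
  · subst h2; decide
  by_cases h3 : c = ':'
  · subst h3; decide
  by_cases h4 : c = '\n'
  · subst h4; decide
  simp [pvF, h1, h2, h3, h4]

-- ===== VERDICT (by name: the statement is the Claim_ definition above) =====
theorem header2Dic_spec : Claim_equal_header2Dic := by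
  intro str _
  unfold Spec_header2Dic header2Dic header2Dic_alt
  apply String.toList_inj.mp
  have e1 : ("\r" : String).toList = ['\r'] := by decide
  have e2 : (" " : String).toList = [' '] := by decide
  have e3 : (":" : String).toList = [':'] := by decide
  have e4 : ("\n" : String).toList = ['\n'] := by decide
  have e5 : ("" : String).toList = [] := by decide
  have e6 : ("':'" : String).toList = ['\'', ':', '\''] := by decide
  have e7 : ("',\n'" : String).toList = ['\'', ',', '\n', '\''] := by decide
  have e8 : ("'" : String).toList = ['\''] := by decide
  simp only [String.toList_ofList, String.toList_append, PySem.Str.toList_replace,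
    e1, e2, e3, e4, e5, e6, e7, e8, pv_replace_single, List.flatMap_assoc]
  rw [pv_A_flatMap]
  congr 1
  refine (List.flatMap_congr ?_).symm
  intro c _
  exact pv_compose c
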